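-- pv_equiv track=rewrite | github.com/nikhilvarshney2/GUVI | Player/set-10/100.py | bch
-- ===== SOURCE A (Python) =====
-- def bch(u):
--     if u==1 or u==0:
--         return u
--     s = 0
--     for i in range(4):
--         s += (2**i)*(u%10)
--         u = u//10
--     return s + 10*bch(u)
-- ===== SOURCE B (Python) =====
-- def bch(u):
--     result = 0
--     place = 1
--     while u != 0 and u != 1:
--         s = (u % 10) + 2 * (u // 10 % 10) + 4 * (u // 100 % 10) + 8 * (u // 1000 % 10)
--         u //= 10000
--         result += place * s
--         place *= 10
--     return result + place * u
-- ===== Notes on version B (the rewrite author's own statement) =====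
-- stated objective: simpler
-- what changed: Replaces the recursion with an iterative Horner-style loop that keeps a running result and a place multiplier, computing each four-digit block sum by direct arithmetic instead of an inner digit loop with mutated state.
import Mathlib
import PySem

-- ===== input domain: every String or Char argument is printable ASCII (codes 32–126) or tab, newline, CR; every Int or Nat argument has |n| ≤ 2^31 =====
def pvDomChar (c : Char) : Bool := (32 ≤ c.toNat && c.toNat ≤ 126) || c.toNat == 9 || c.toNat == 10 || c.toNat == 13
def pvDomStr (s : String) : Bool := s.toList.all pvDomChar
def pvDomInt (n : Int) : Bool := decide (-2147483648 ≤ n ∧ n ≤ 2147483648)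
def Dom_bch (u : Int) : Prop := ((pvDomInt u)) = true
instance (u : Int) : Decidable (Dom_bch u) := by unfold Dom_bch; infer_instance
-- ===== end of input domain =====

-- B replaces A's recursion by an iterative Horner-style accumulation (running result + place
-- multiplier, block sum by direct arithmetic); objective: simpler. Return values agree on Pre_.


-- ===== PORT A =====
-- A's recursion; the fuel only makes the recursion total (on Pre_ it never runs out).
def bchFuelA : Nat → Int → Int
  | 0, u => u
  | f + 1, u =>
    if u = 1 ∨ u = 0 then u
    else
      -- A's inner digit loop over the four lowest digits, as a fold with state (s, u)
      let su := (PySem.List.pyRange 0 4 1).foldl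
        (fun p i => (p.1 + 2 ^ i.toNat * PySem.Int.mod p.2 10, PySem.Int.floordiv p.2 10))
        ((0 : Int), u)
      su.1 + 10 * bchFuelA f su.2

def bch (u : Int) : Int := bchFuelA (u.natAbs + 1) u

-- ===== PORT B =====
-- B's while loop; the fuel only makes the loop total (on Pre_ it never runs out).
def bchLoopB : Nat → Int → Int → Int → Int
  | 0, u, place, result => result + place * u
  | f + 1, u, place, result =>
    if u ≠ 0 ∧ u ≠ 1 then
      let s := PySem.Int.mod u 10
        + 2 * PySem.Int.mod (PySem.Int.floordiv u 10) 10
        + 4 * PySem.Int.mod (PySem.Int.floordiv u 100) 10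
        + 8 * PySem.Int.mod (PySem.Int.floordiv u 1000) 10
      bchLoopB f (PySem.Int.floordiv u 10000) (place * 10) (result + place * s)
    else result + place * u

def bch_alt (u : Int) : Int := bchLoopB (u.natAbs + 1) u 1 0

-- ===== PRECONDITION & SPEC =====
-- Pre_ excludes negative u: there A's recursion never reaches a base case (the quotient
-- stabilises at minus one) and raises RecursionError, while B's loop diverges the same way;
-- neither program returns a value on those inputs.
def Pre_bch (u : Int) : Prop := 0 ≤ u
instance (u : Int) : Decidable (Pre_bch u) := by unfold Pre_bch; infer_instance
def pvWitness_bch : Int := 2024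
def Spec_bch (u : Int) (out : Int) : Prop := out = bch_alt u
instance (u : Int) (out : Int) : Decidable (Spec_bch u out) := by unfold Spec_bch; infer_instance

-- ===== CLAIM (what is proved, stated in full; the proofs are below) =====
def Claim_equal_bch : Prop := ∀ (u : Int), Dom_bch u → Pre_bch u → Spec_bch u (bch u)

-- ===== LEMMAS AND PROOFS =====

-- A's inner digit loop, evaluated: the block sum and the quotient after four division steps.
theorem bchA_fold (u : Int) :
    ((PySem.List.pyRange 0 4 1).foldl
      (fun p i => (p.1 + 2 ^ i.toNat * PySem.Int.mod p.2 10, PySem.Int.floordiv p.2 10))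
      ((0 : Int), u))
    = (PySem.Int.mod u 10
        + 2 * PySem.Int.mod (PySem.Int.floordiv u 10) 10
        + 4 * PySem.Int.mod (PySem.Int.floordiv (PySem.Int.floordiv u 10) 10) 10
        + 8 * PySem.Int.mod (PySem.Int.floordiv (PySem.Int.floordiv (PySem.Int.floordiv u 10) 10) 10) 10,
       PySem.Int.floordiv (PySem.Int.floordiv (PySem.Int.floordiv (PySem.Int.floordiv u 10) 10) 10) 10) := by
  have h : PySem.List.pyRange 0 4 1 = [0, 1, 2, 3] := by decide
  simp [h, List.foldl]

theorem floordiv_floordiv (u a b : Int) (ha : 0 < a) (hb : 0 < b) (_hu : 0 ≤ u) :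
    PySem.Int.floordiv (PySem.Int.floordiv u a) b = PySem.Int.floordiv u (a * b) := by
  have h1 : PySem.Int.floordiv u a = u / a := PySem.Int.floordiv_eq_ediv_of_pos ha
  have h2 : PySem.Int.floordiv u (a * b) = u / (a * b) := PySem.Int.floordiv_eq_ediv_of_pos (by positivity)
  have h3 : PySem.Int.floordiv (u / a) b = u / a / b :=
    PySem.Int.floordiv_eq_ediv_of_pos hb
  rw [h1, h3, h2]; exact Int.ediv_ediv_of_nonneg (le_of_lt ha)

-- Loop invariant: B's loop accumulates result + place * (A's value), fuel stepping in sync.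
theorem loop_inv : ∀ (f : Nat) (u place result : Int), 0 ≤ u → u.natAbs < f →
    bchLoopB f u place result = result + place * bchFuelA f u := by
  intro f
  induction f with
  | zero => intro u place result _ h; omega
  | succ f ih =>
    intro u place result hu hf
    by_cases hc : u = 0 ∨ u = 1
    · have hc' : ¬ (u ≠ 0 ∧ u ≠ 1) := by tauto
      simp [bchLoopB, bchFuelA, hc', hc.symm]
    · have hc1 : u ≠ 0 ∧ u ≠ 1 := by tauto
      have hu2 : 2 ≤ u := by omega
      have e10 : PySem.Int.floordiv u 10 = u / 10 := PySem.Int.floordiv_eq_ediv_of_pos (by norm_num)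
      have e100 : PySem.Int.floordiv (PySem.Int.floordiv u 10) 10 = PySem.Int.floordiv u 100 :=
        floordiv_floordiv u 10 10 (by norm_num) (by norm_num) hu
      have e1000 : PySem.Int.floordiv (PySem.Int.floordiv u 100) 10 = PySem.Int.floordiv u 1000 :=
        floordiv_floordiv u 100 10 (by norm_num) (by norm_num) hu
      have e10000 : PySem.Int.floordiv (PySem.Int.floordiv u 1000) 10 = PySem.Int.floordiv u 10000 :=
        floordiv_floordiv u 1000 10 (by norm_num) (by norm_num) hu
      have eq4 : PySem.Int.floordiv u 10000 = u / 10000 :=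
        PySem.Int.floordiv_eq_ediv_of_pos (by norm_num)
      have hu4 : 0 ≤ u / 10000 := Int.ediv_nonneg hu (by norm_num)
      have hlt : u / 10000 < u := by omega
      have hfuel : (u / 10000).natAbs < f := by omega
      have hA : bchFuelA (f + 1) u
          = (PySem.Int.mod u 10
              + 2 * PySem.Int.mod (PySem.Int.floordiv u 10) 10
              + 4 * PySem.Int.mod (PySem.Int.floordiv u 100) 10
              + 8 * PySem.Int.mod (PySem.Int.floordiv u 1000) 10)
            + 10 * bchFuelA f (PySem.Int.floordiv u 10000) := by
        have hc2 : ¬ (u = 1 ∨ u = 0) := by tauto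
        rw [bchFuelA, if_neg hc2]
        simp only [bchA_fold]
        rw [e100, e1000, e10000]
      have hB : bchLoopB (f + 1) u place result
          = bchLoopB f (PySem.Int.floordiv u 10000) (place * 10)
              (result + place * (PySem.Int.mod u 10
                + 2 * PySem.Int.mod (PySem.Int.floordiv u 10) 10
                + 4 * PySem.Int.mod (PySem.Int.floordiv u 100) 10
                + 8 * PySem.Int.mod (PySem.Int.floordiv u 1000) 10)) := by
        rw [bchLoopB, if_pos hc1]
      rw [hA, hB, ih _ _ _ (by rw [eq4]; exact hu4) (by rw [eq4]; exact hfuel)]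
      ring

-- ===== VERDICT (by name: the statement is the Claim_ definition above) =====
theorem bch_spec : Claim_equal_bch := by
  intro u _ hpre
  unfold Spec_bch bch bch_alt
  rw [loop_inv (u.natAbs + 1) u 1 0 hpre (by omega)]
  ring
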